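-- pv_equiv track=rewrite | github.com/vibbits/tomo | odemis/plugins/tileacq_focusmap_vib.py | _generate_scanning_indices
-- ===== SOURCE A (Python) =====
-- def _generate_scanning_indices(rep):
--     """
--     Generate the explicit X/Y position of each tile, in the scanning order
--     rep (int, int): X, Y number of tiles
--     return (generator of tuple(int, int)): x/y positions, starting from 0,0
--     """
--     # For now we do forward/backward on X (fast), and Y (slowly)
--     direction = 1
--     for iy in range(rep[1]):
--         if direction == 1:
--             for ix in range(rep[0]):
--                 yield (ix, iy)
--         else:
--             for ix in range(rep[0] - 1, -1, -1):
--                 yield (ix, iy)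
--
--         direction *= -1
-- ===== SOURCE B (Python) =====
-- def _generate_scanning_indices(rep):
--     """Serpentine scan order via a single flat loop with divmod (row 0 forward)."""
--     nx, ny = rep
--     if nx <= 0 or ny <= 0:
--         return
--     for i in range(nx * ny):
--         iy, ix = divmod(i, nx)
--         if iy % 2:
--             ix = nx - 1 - ix
--         yield (ix, iy)
-- ===== Notes on version B (the rewrite author's own statement) =====
-- stated objective: alternative
-- what changed: Replaces the nested row loops and the alternating direction flag with a single flat loop over range(nx*ny) computing each tile's coordinates in closed form with divmod and row-parity reflection.
import Mathlib
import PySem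

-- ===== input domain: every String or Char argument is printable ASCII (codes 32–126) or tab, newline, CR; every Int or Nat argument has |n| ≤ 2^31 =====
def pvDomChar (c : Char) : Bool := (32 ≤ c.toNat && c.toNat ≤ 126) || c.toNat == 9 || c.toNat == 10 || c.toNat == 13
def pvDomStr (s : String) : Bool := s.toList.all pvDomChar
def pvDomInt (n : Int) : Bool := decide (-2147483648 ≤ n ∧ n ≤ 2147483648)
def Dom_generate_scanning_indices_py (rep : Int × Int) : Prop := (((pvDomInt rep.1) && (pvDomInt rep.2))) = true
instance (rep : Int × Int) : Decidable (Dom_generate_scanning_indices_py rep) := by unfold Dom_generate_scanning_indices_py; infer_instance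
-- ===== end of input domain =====

-- B replaces A's nested row loops and alternating direction flag with one flat loop over
-- range(nx*ny), computing each tile by divmod and row-parity reflection (same cost, different decomposition).

-- ===== PORT A =====
-- literal transliteration: direction flag, outer loop over rows, inner forward or backward range
def generate_scanning_indices_py (rep : Int × Int) : List (Int × Int) :=
  ((PySem.List.pyRange 0 rep.2 1).foldl
    (fun (st : List (Int × Int) × Int) iy =>
      let row :=
        if st.2 = 1 then
          (PySem.List.pyRange 0 rep.1 1).map (fun ix => (ix, iy))
        else
          (PySem.List.pyRange (rep.1 - 1) (-1) (-1)).map (fun ix => (ix, iy))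
      (st.1 ++ row, st.2 * (-1)))
    (([] : List (Int × Int)), (1 : Int))).1

-- ===== PORT B =====
-- literal transliteration of Source B: early return on non-positive counts, one flat loop with divmod
def generate_scanning_indices_py_alt (rep : Int × Int) : List (Int × Int) :=
  if rep.1 ≤ 0 ∨ rep.2 ≤ 0 then []
  else
    (PySem.List.pyRange 0 (rep.1 * rep.2) 1).map (fun i =>
      let iy := PySem.Int.floordiv i rep.1
      let ix := PySem.Int.mod i rep.1
      let ix := if PySem.Int.mod iy 2 ≠ 0 then rep.1 - 1 - ix else ix
      (ix, iy))

-- ===== PRECONDITION & SPEC =====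
def Spec_generate_scanning_indices_py (rep : Int × Int) (out : List (Int × Int)) : Prop := out = generate_scanning_indices_py_alt rep
instance (rep : Int × Int) (out : List (Int × Int)) : Decidable (Spec_generate_scanning_indices_py rep out) := by unfold Spec_generate_scanning_indices_py; infer_instance

-- ===== CLAIM (what is proved, stated in full; the proofs are below) =====
def Claim_equal_generate_scanning_indices_py : Prop := ∀ (rep : Int × Int), Dom_generate_scanning_indices_py rep → Spec_generate_scanning_indices_py rep (generate_scanning_indices_py rep)

-- ===== LEMMAS AND PROOFS =====

-- B's per-tile closed form, named so the lemmas can speak about it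
def gsiG (nx i : Int) : Int × Int :=
  let iy := PySem.Int.floordiv i nx
  let ix := PySem.Int.mod i nx
  (if PySem.Int.mod iy 2 ≠ 0 then nx - 1 - ix else ix, iy)

-- A's loop body, named
def gsiF (nx : Int) (st : List (Int × Int) × Int) (iy : Int) : List (Int × Int) × Int :=
  let row :=
    if st.2 = 1 then
      (PySem.List.pyRange 0 nx 1).map (fun ix => (ix, iy))
    else
      (PySem.List.pyRange (nx - 1) (-1) (-1)).map (fun ix => (ix, iy))
  (st.1 ++ row, st.2 * (-1))

theorem gsiA_eq (rep : Int × Int) :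
    generate_scanning_indices_py rep
      = ((PySem.List.pyRange 0 rep.2 1).foldl (gsiF rep.1) ([], 1)).1 := rfl

theorem gsiB_eq (rep : Int × Int) (h1 : ¬ rep.1 ≤ 0) (h2 : ¬ rep.2 ≤ 0) :
    generate_scanning_indices_py_alt rep
      = (PySem.List.pyRange 0 (rep.1 * rep.2) 1).map (gsiG rep.1) := by
  simp [generate_scanning_indices_py_alt, h1, h2, gsiG]

theorem gsiG_at (nx : Int) (hnx : 0 < nx) (m k : Int) (_hm : 0 ≤ m) (hk0 : 0 ≤ k) (hk : k < nx) :
    gsiG nx (nx * m + k) = (if PySem.Int.mod m 2 ≠ 0 then nx - 1 - k else k, m) := by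
  have hdiv : PySem.Int.floordiv (nx * m + k) nx = m := by
    rw [PySem.Int.floordiv_eq_iff_of_pos hnx]
    constructor <;> nlinarith
  have hmod : PySem.Int.mod (nx * m + k) nx = k := by
    have := PySem.Int.floordiv_mul_add_mod (nx * m + k) nx
    rw [hdiv] at this; linarith
  simp [gsiG, hdiv, hmod]

-- one block of nx consecutive flat indices is exactly one row of A (forward or backward by parity)
theorem gsi_seg (nx : Int) (hnx : 0 < nx) (m : Nat) :
    (PySem.List.pyRange (nx * m) (nx * m + nx) 1).map (gsiG nx)
      = if m % 2 = 0 then (PySem.List.pyRange 0 nx 1).map (fun ix => (ix, (m : Int)))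
        else (PySem.List.pyRange (nx - 1) (-1) (-1)).map (fun ix => (ix, (m : Int))) := by
  rw [PySem.List.pyRange_one, PySem.List.pyRange_one, PySem.List.pyRange_neg_one]
  simp only [List.map_map]
  have hlen : (nx * m + nx - nx * m).toNat = (nx - 0).toNat := by omega
  rw [hlen]
  split
  · next hev =>
    refine List.map_congr_left (fun k hk => ?_)
    simp only [List.mem_range] at hk
    have hk' : (k : Int) < nx := by omega
    simp only [Function.comp]
    rw [gsiG_at nx hnx m k (by positivity) (by positivity) hk']
    simp
    omega
  · next hodd =>
    rw [show ((nx - 1 - -1).toNat) = (nx - 0).toNat from by omega]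
    refine List.map_congr_left (fun k hk => ?_)
    simp only [List.mem_range] at hk
    have hk' : (k : Int) < nx := by omega
    simp only [Function.comp]
    rw [gsiG_at nx hnx m k (by positivity) (by positivity) hk']
    simp
    omega

-- the loop invariant: after m rows A has produced B's first nx*m tiles, direction = (-1)^m
theorem gsi_main (nx : Int) (hnx : 0 < nx) (m : Nat) :
    (PySem.List.pyRange 0 (m : Int) 1).foldl (gsiF nx) ([], 1)
      = ((PySem.List.pyRange 0 (nx * m) 1).map (gsiG nx),
         if m % 2 = 0 then 1 else -1) := by
  induction m with
  | zero => simp [PySem.List.pyRange_one_eq_nil]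
  | succ n ih =>
    rw [show ((n + 1 : Nat) : Int) = (n : Int) + 1 by push_cast; ring,
        PySem.List.pyRange_one_succ_right (by positivity)]
    rw [List.foldl_append, ih]
    have hsplit : PySem.List.pyRange 0 (nx * ((n:Int) + 1)) 1
        = PySem.List.pyRange 0 (nx * n) 1 ++ PySem.List.pyRange (nx * n) (nx * n + nx) 1 := by
      have : nx * ((n:Int) + 1) = nx * n + nx := by ring
      rw [this, PySem.List.pyRange_one_append 0 (nx * n) (nx * n + nx) (by positivity) (by linarith)]
    rw [hsplit, List.map_append]
    simp only [List.foldl_cons, List.foldl_nil, gsiF]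
    rw [gsi_seg nx hnx n]
    by_cases hev : n % 2 = 0
    · have : (n + 1) % 2 ≠ 0 := by omega
      simp [hev, this]
    · have : (n + 1) % 2 = 0 := by omega
      simp [hev, this]

-- when nx ≤ 0 every row of A is empty, so the accumulator never grows
theorem foldl_empty_rows (nx : Int) (hnx : nx ≤ 0) (l : List Int) (acc : List (Int × Int)) (d : Int) :
    (l.foldl (gsiF nx) (acc, d)).1 = acc := by
  induction l generalizing acc d with
  | nil => rfl
  | cons x xs ih =>
    simp only [List.foldl_cons, gsiF]
    rw [PySem.List.pyRange_one_eq_nil hnx, PySem.List.pyRange_neg_one_eq_nil (by omega)]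
    simp [ih]

-- ===== VERDICT (by name: the statement is the Claim_ definition above) =====
theorem generate_scanning_indices_py_spec : Claim_equal_generate_scanning_indices_py := by
  intro ⟨nx, ny⟩ _
  unfold Spec_generate_scanning_indices_py
  by_cases h2 : ny ≤ 0
  · rw [gsiA_eq]
    simp [generate_scanning_indices_py_alt, h2, PySem.List.pyRange_one_eq_nil h2]
  · by_cases h1 : nx ≤ 0
    · rw [gsiA_eq]
      simp only
      rw [foldl_empty_rows nx h1]
      simp [generate_scanning_indices_py_alt, h1]
    · rw [gsiA_eq, gsiB_eq ⟨nx, ny⟩ h1 h2]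
      simp only
      obtain ⟨m, hm⟩ : ∃ m : Nat, ny = (m : Int) := ⟨ny.toNat, by omega⟩
      rw [hm, gsi_main nx (by omega) m]
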